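-- pv_equiv track=rewrite | github.com/kevinveenbirkenbach/infinito-nexus | cli/create/inventory.py | parse_roles_list
-- ===== SOURCE A (Python) =====
-- from typing import Dict, Any, List, Set, Optional
--
-- def parse_roles_list(raw_roles: Optional[List[str]]) -> Optional[Set[str]]:
--     """
--     Parse a list of roles supplied on the CLI. Supports:
--       --roles web-app-nextcloud web-app-mastodon
--       --roles web-app-nextcloud,web-app-mastodon
--     """
--     if not raw_roles:
--         return None
--     result: Set[str] = set()
--     for token in raw_roles:
--         token = token.strip()
--         if not token:
--             continue
--         # Allow comma-separated tokens as well
--         for part in token.split(","):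
--             part = part.strip()
--             if part:
--                 result.add(part)
--     return result
-- ===== SOURCE B (Python) =====
-- from typing import List, Set, Optional
--
-- def parse_roles_list(raw_roles: Optional[List[str]]) -> Optional[Set[str]]:
--     if not raw_roles:
--         return None
--     joined = ",".join(raw_roles)
--     return {p.strip() for p in joined.split(",") if p.strip()}
-- ===== Notes on version B (the rewrite author's own statement) =====
-- stated objective: simpler
-- what changed: Replaces the nested per-token/per-part loop with explicit strip-and-skip branches by joining all tokens into one comma-separated string, splitting it once, and building the set with a single comprehension.
import Mathlib
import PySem

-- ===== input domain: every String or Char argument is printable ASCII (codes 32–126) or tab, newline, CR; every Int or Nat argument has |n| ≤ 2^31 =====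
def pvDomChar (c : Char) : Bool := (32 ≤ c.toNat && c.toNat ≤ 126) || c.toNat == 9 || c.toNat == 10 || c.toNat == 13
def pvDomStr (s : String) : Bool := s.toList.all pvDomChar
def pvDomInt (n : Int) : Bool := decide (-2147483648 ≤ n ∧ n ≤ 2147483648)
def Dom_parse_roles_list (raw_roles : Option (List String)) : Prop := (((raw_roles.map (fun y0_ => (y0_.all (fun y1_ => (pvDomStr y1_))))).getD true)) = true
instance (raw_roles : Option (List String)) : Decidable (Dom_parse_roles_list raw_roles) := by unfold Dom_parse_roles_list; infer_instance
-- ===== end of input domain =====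

-- B replaces A's nested per-token/per-part loops by joining all tokens with commas and doing a single split + one comprehension (objective: simpler).


-- ===== PORT A =====
def parse_roles_list (raw_roles : Option (List String)) : Option (List String) :=
  match raw_roles with
  | none => none            -- `if not raw_roles` is true for None …
  | some [] => none         -- … and for the empty list
  | some l =>
    some (l.foldl (fun result token0 =>
      let token := PySem.Str.strip token0
      if token = "" then result
      else ((PySem.Str.split? token ",").getD []).foldl (fun result part0 =>
        let part := PySem.Str.strip part0
        if part = "" then result else PySem.Set.add result part) result)
      PySem.Set.empty)

-- ===== PORT B =====
def parse_roles_list_alt (raw_roles : Option (List String)) : Option (List String) :=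
  match raw_roles with
  | some (t :: ts) =>
    let l := t :: ts
    let joined := PySem.Str.join "," l
    some (PySem.Set.ofList (((PySem.Str.split? joined ",").getD []).filterMap
      (fun p => if PySem.Str.strip p = "" then none else some (PySem.Str.strip p))))
  | _ => none

-- ===== PRECONDITION & SPEC =====
def Spec_parse_roles_list (raw_roles : Option (List String)) (out : Option (List String)) : Prop := out = parse_roles_list_alt raw_roles
instance (raw_roles : Option (List String)) (out : Option (List String)) : Decidable (Spec_parse_roles_list raw_roles out) := by unfold Spec_parse_roles_list; infer_instance

-- ===== CLAIM (what is proved, stated in full; the proofs are below) =====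
def Claim_equal_parse_roles_list : Prop := ∀ (raw_roles : Option (List String)), Dom_parse_roles_list raw_roles → Spec_parse_roles_list raw_roles (parse_roles_list raw_roles)

-- ===== LEMMAS AND PROOFS =====

-- comma-splitting by simple structural recursion (proof-side model of splitOn with sep ",")
def spC : List Char → List (List Char)
  | [] => [[]]
  | c :: r =>
    if c = ',' then [] :: spC r
    else match spC r with
      | [] => [[c]]       -- unreachable: spC never returns []
      | x :: xs => (c :: x) :: xs

lemma spC_ne_nil (cs : List Char) : spC cs ≠ [] := by
  cases cs with
  | nil => simp [spC]
  | cons c r =>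
    simp only [spC]
    split_ifs
    · simp
    · cases h : spC r <;> simp

lemma go_eq (l : List Char) : ∀ (fuel : Nat) (cur : List Char) (acc : List (List Char)),
    l.length < fuel →
    PySem.Chars.splitOn.go [','] fuel l cur acc =
      acc.reverse ++ (match spC l with
        | [] => []
        | x :: xs => (cur.reverse ++ x) :: xs) := by
  induction l with
  | nil =>
    intro fuel cur acc h
    cases fuel with
    | zero => omega
    | succ f =>
      rw [PySem.Chars.splitOn.go]
      simp [spC]
      omega
  | cons c rest ih =>
    intro fuel cur acc h
    cases fuel with
    | zero => simp at h
    | succ f =>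
      rw [PySem.Chars.splitOn.go]
      by_cases hc : c = ','
      · subst hc
        have hpre : [','].isPrefixOf (',' :: rest) = true := by simp [List.isPrefixOf]
        rw [if_pos hpre]
        have hdrop : List.drop (List.length [(',' : Char)]) (',' :: rest) = rest := rfl
        rw [hdrop, ih f [] (cur.reverse :: acc) (by simp at h; omega)]
        cases hr : spC rest with
        | nil => exact absurd hr (spC_ne_nil rest)
        | cons x xs => simp [spC, hr]
      · have hpre : [','].isPrefixOf (c :: rest) = false := by
          simp [List.isPrefixOf]
          exact fun h' => absurd h'.symm hc
        simp only [hpre, Bool.false_eq_true, if_false]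
        rw [ih f (c :: cur) acc (by simp at h ⊢; omega)]
        cases hr : spC rest with
        | nil => exact absurd hr (spC_ne_nil rest)
        | cons x xs => simp [spC, hr, hc]

lemma splitOn_comma (cs : List Char) : PySem.Chars.splitOn cs [','] = spC cs := by
  rw [PySem.Chars.splitOn, go_eq cs (cs.length + 1) [] [] (by omega)]
  cases h : spC cs with
  | nil => exact absurd h (spC_ne_nil cs)
  | cons x xs => simp

-- the pieces a token contributes: split on commas, strip, drop empties
def piecesC (cs : List Char) : List (List Char) :=
  ((spC cs).map PySem.Chars.strip).filter (fun x => !x.isEmpty)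

lemma spC_append_comma (a b : List Char) : spC (a ++ ',' :: b) = spC a ++ spC b := by
  induction a with
  | nil => simp [spC]
  | cons c r ih =>
    by_cases hc : c = ','
    · subst hc; simp [spC, ih]
    · simp only [List.cons_append, spC, hc, if_false, ih]
      cases hr : spC r with
      | nil => exact absurd hr (spC_ne_nil r)
      | cons x xs => simp

lemma piecesC_append_comma (a b : List Char) :
    piecesC (a ++ ',' :: b) = piecesC a ++ piecesC b := by
  simp [piecesC, spC_append_comma]

lemma strip_cons_space (c : Char) (h : PySem.Chars.isspace c = true) (x : List Char) :
    PySem.Chars.strip (c :: x) = PySem.Chars.strip x := by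
  simp [PySem.Chars.strip, PySem.Chars.lstrip, h]

lemma rstrip_concat_space (c : Char) (h : PySem.Chars.isspace c = true) (x : List Char) :
    PySem.Chars.rstrip (x ++ [c]) = PySem.Chars.rstrip x := by
  simp [PySem.Chars.rstrip, h]

lemma strip_concat_space (c : Char) (h : PySem.Chars.isspace c = true) (x : List Char) :
    PySem.Chars.strip (x ++ [c]) = PySem.Chars.strip x := by
  rw [PySem.Chars.strip, PySem.Chars.strip, PySem.Chars.lstrip, PySem.Chars.lstrip,
    List.dropWhile_append]
  split_ifs with he
  · rw [List.isEmpty_iff] at he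
    rw [he]
    simp [h, PySem.Chars.rstrip]
  · exact rstrip_concat_space c h _

lemma piecesC_lstrip (cs : List Char) : piecesC (PySem.Chars.lstrip cs) = piecesC cs := by
  induction cs with
  | nil => rfl
  | cons c r ih =>
    by_cases hs : PySem.Chars.isspace c = true
    · have h1 : PySem.Chars.lstrip (c :: r) = PySem.Chars.lstrip r := by
        simp [PySem.Chars.lstrip, hs]
      rw [h1, ih]
      have hc : c ≠ ',' := by
        intro hc; subst hc; simp [PySem.Chars.isspace] at hs
      simp only [piecesC, spC, hc, if_false]
      cases hr : spC r with
      | nil => exact absurd hr (spC_ne_nil r)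
      | cons x xs => simp [strip_cons_space c hs]
    · have h1 : PySem.Chars.lstrip (c :: r) = c :: r := by
        simp [PySem.Chars.lstrip, hs]
      rw [h1]

-- modify the last element of a list
def mLast (f : List Char → List Char) : List (List Char) → List (List Char)
  | [] => []
  | [x] => [f x]
  | x :: y :: xs => x :: mLast f (y :: xs)

lemma spC_concat (xs : List Char) (c : Char) (hc : c ≠ ',') :
    spC (xs ++ [c]) = mLast (· ++ [c]) (spC xs) := by
  induction xs with
  | nil => simp [spC, hc, mLast]
  | cons x r ih =>
    by_cases hx : x = ','
    · subst hx
      simp only [List.cons_append, spC, reduceIte, ih]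
      cases hr : spC r with
      | nil => exact absurd hr (spC_ne_nil r)
      | cons y ys => cases ys <;> simp [mLast]
    · simp only [List.cons_append, spC, hx, if_false, ih]
      cases hr : spC r with
      | nil => exact absurd hr (spC_ne_nil r)
      | cons y ys => cases ys <;> simp [mLast]

lemma map_strip_mLast (c : Char) (h : PySem.Chars.isspace c = true) (l : List (List Char)) :
    (mLast (· ++ [c]) l).map PySem.Chars.strip = l.map PySem.Chars.strip := by
  induction l with
  | nil => rfl
  | cons x xs ih =>
    cases xs with
    | nil => simp [mLast, strip_concat_space c h]
    | cons y ys => simpa [mLast] using ih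

lemma piecesC_concat_space (xs : List Char) (c : Char) (h : PySem.Chars.isspace c = true) :
    piecesC (xs ++ [c]) = piecesC xs := by
  have hc : c ≠ ',' := by
    intro hc; subst hc; simp [PySem.Chars.isspace] at h
  rw [piecesC, spC_concat xs c hc, map_strip_mLast c h, piecesC]

lemma piecesC_rstrip (cs : List Char) : piecesC (PySem.Chars.rstrip cs) = piecesC cs := by
  induction cs using List.reverseRecOn with
  | nil => rfl
  | append_singleton xs c ih =>
    by_cases hs : PySem.Chars.isspace c = true
    · rw [rstrip_concat_space c hs, ih, piecesC_concat_space xs c hs]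
    · have h1 : PySem.Chars.rstrip (xs ++ [c]) = xs ++ [c] := by
        simp [PySem.Chars.rstrip, hs]
      rw [h1]

lemma piecesC_strip (cs : List Char) : piecesC (PySem.Chars.strip cs) = piecesC cs := by
  rw [PySem.Chars.strip, piecesC_rstrip, piecesC_lstrip]

-- string-level pieces of a token
def piecesS (t : String) : List String := (piecesC t.toList).map String.ofList

lemma split?_comma (s : String) :
    (PySem.Str.split? s ",").getD [] = (spC s.toList).map String.ofList := by
  rw [PySem.Str.split?]
  have hsep : ("," : String).toList = [','] := rfl
  rw [hsep, PySem.Chars.split?]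
  simp [splitOn_comma]

lemma ofList_eq_empty_iff (x : List Char) : (String.ofList x = "") ↔ x = [] := by
  constructor
  · intro h; have := congrArg String.toList h; simpa using this
  · intro h; simp [h]

lemma strip_ofList (x : List Char) :
    PySem.Str.strip (String.ofList x) = String.ofList (PySem.Chars.strip x) := by
  rw [PySem.Str.strip, String.toList_ofList]

lemma filterMap_strip (xs : List (List Char)) :
    (xs.map String.ofList).filterMap
      (fun p => if PySem.Str.strip p = "" then none else some (PySem.Str.strip p))
    = ((xs.map PySem.Chars.strip).filter (fun x => !x.isEmpty)).map String.ofList := by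
  induction xs with
  | nil => rfl
  | cons x xs ih =>
    simp only [List.map_cons, List.filterMap_cons, List.filter_cons, strip_ofList,
      ofList_eq_empty_iff]
    by_cases h : PySem.Chars.strip x = []
    · simp [h, ih]
    · have : (PySem.Chars.strip x).isEmpty = false := by
        cases hx : PySem.Chars.strip x with
        | nil => exact absurd hx h
        | cons a b => rfl
      simp [h, this, ih]

lemma foldl_strip_add (ps : List String) (s : PySem.Set String) :
    ps.foldl (fun r p =>
      let part := PySem.Str.strip p
      if part = "" then r else PySem.Set.add r part) s
    = PySem.Set.update s (ps.filterMap
        (fun p => if PySem.Str.strip p = "" then none else some (PySem.Str.strip p))) := by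
  induction ps generalizing s with
  | nil => rfl
  | cons p ps ih =>
    simp only [List.foldl_cons, List.filterMap_cons]
    by_cases h : PySem.Str.strip p = ""
    · simpa [h] using ih s
    · simpa [h, PySem.Set.update] using ih (PySem.Set.add s (PySem.Str.strip p))

lemma strip_eq_empty_toList (t : String) :
    (PySem.Str.strip t = "") ↔ PySem.Chars.strip t.toList = [] := by
  rw [PySem.Str.strip, ofList_eq_empty_iff]

lemma token_step (s : PySem.Set String) (t : String) :
    (let token := PySem.Str.strip t
     if token = "" then s
     else ((PySem.Str.split? token ",").getD []).foldl (fun r p =>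
       let part := PySem.Str.strip p
       if part = "" then r else PySem.Set.add r part) s)
    = PySem.Set.update s (piecesS t) := by
  simp only
  by_cases h : PySem.Str.strip t = ""
  · have h1 : PySem.Chars.strip t.toList = [] := (strip_eq_empty_toList t).mp h
    have h2 : piecesC t.toList = [] := by
      rw [← piecesC_strip, h1]; rfl
    simp [h, piecesS, h2, PySem.Set.update]
  · rw [if_neg h, foldl_strip_add, split?_comma, filterMap_strip]
    have h1 : (PySem.Str.strip t).toList = PySem.Chars.strip t.toList := by
      rw [PySem.Str.strip, String.toList_ofList]
    rw [h1]
    show PySem.Set.update s ((piecesC (PySem.Chars.strip t.toList)).map String.ofList) = _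
    rw [piecesC_strip, piecesS]

lemma a_fold (l : List String) (s : PySem.Set String) :
    l.foldl (fun result token0 =>
      let token := PySem.Str.strip token0
      if token = "" then result
      else ((PySem.Str.split? token ",").getD []).foldl (fun result part0 =>
        let part := PySem.Str.strip part0
        if part = "" then result else PySem.Set.add result part) result) s
    = PySem.Set.update s (l.flatMap piecesS) := by
  induction l generalizing s with
  | nil => rfl
  | cons t l ih =>
    rw [List.foldl_cons, List.flatMap_cons, token_step s t, ih,
      PySem.Set.update, PySem.Set.update, PySem.Set.update, List.foldl_append]

lemma pieces_join (t : String) (l : List String) :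
    piecesC (PySem.Str.join "," (t :: l)).toList = (t :: l).flatMap (fun u => piecesC u.toList) := by
  induction l generalizing t with
  | nil =>
    rw [PySem.Str.toList_join]
    simp [PySem.Chars.join_singleton]
  | cons u l ih =>
    rw [PySem.Str.toList_join, List.map_cons, List.map_cons,
      PySem.Chars.join_cons_cons]
    have h1 : t.toList ++ ("," : String).toList ++
        PySem.Chars.join (",".toList) (u.toList :: l.map String.toList)
        = t.toList ++ ',' :: PySem.Chars.join (",".toList) (u.toList :: l.map String.toList) := by
      simp
    rw [h1, piecesC_append_comma]
    have h2 : PySem.Chars.join (",".toList) (u.toList :: l.map String.toList)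
        = (PySem.Str.join "," (u :: l)).toList := by
      rw [PySem.Str.toList_join, List.map_cons]
    rw [h2, ih u, List.flatMap_cons]
    simp [List.flatMap_cons]

-- ===== VERDICT (by name: the statement is the Claim_ definition above) =====
theorem parse_roles_list_spec : Claim_equal_parse_roles_list := by
  intro raw _
  unfold Spec_parse_roles_list parse_roles_list parse_roles_list_alt
  match raw with
  | none => rfl
  | some [] => rfl
  | some (t :: l) =>
    simp only
    rw [a_fold, split?_comma, filterMap_strip]
    congr 1
    rw [PySem.Set.update_empty]
    congr 1
    show _ = (piecesC (PySem.Str.join "," (t :: l)).toList).map String.ofList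
    rw [pieces_join]
    simp only [List.map_flatMap]
    rfl
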